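-- pv_equiv track=rewrite | github.com/PgmJun/CodingTest | 프로그래머스/unrated/181932. 코드 처리하기/코드 처리하기.py | solution
-- ===== SOURCE A (Python) =====
-- def solution(code):
--     answer = 'EMPTY'
--     ret = []
--     mode = 0
--
--     for idx in range(len(code)):
--         if mode == 0:
--             if code[idx] != '1':
--                 if idx%2 == 0:
--                     ret.append(code[idx])
--             elif code[idx] == '1':
--                 mode = 1
--
--         elif mode == 1:
--             if code[idx] != '1':
--                 if idx%2 == 1:
--                     ret.append(code[idx])
--             elif code[idx] == '1':
--                 mode = 0
--
--     if len(ret) > 0: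
--         answer = ''.join(ret)
--     return answer
-- ===== SOURCE B (Python) =====
-- def solution(code):
--     # split on the toggle char; segment k is governed by mode k%2,
--     # and within a segment the kept chars form a stride-2 slice
--     out = []
--     pos = 0
--     for k, seg in enumerate(code.split('1')):
--         out.append(seg[(k - pos) % 2::2])
--         pos += len(seg) + 1
--     s = ''.join(out)
--     return s if s else 'EMPTY'
-- ===== Notes on version B (the rewrite author's own statement) =====
-- stated objective: alternative
-- what changed: Replaces A's per-character mode-toggling state machine with a two-stage structure: split the string on the toggle character, then take a stride-2 slice of each segment (segment k keeps every other character starting at offset (k - pos) % 2) and join the pieces.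
import Mathlib
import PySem

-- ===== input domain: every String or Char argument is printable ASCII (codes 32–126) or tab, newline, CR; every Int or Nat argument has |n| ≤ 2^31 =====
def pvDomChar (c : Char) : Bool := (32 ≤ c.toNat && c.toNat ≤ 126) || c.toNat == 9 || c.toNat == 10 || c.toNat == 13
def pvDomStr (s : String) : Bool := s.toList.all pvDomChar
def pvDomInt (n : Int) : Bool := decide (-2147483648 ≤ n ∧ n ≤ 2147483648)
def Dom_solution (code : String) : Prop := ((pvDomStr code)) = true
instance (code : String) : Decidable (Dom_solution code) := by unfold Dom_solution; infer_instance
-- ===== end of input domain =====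

-- B replaces A's index-loop state machine by split-on-'1' plus a stride-2 slice of each
-- segment (same O(n) cost, a different decomposition of the task).

-- ===== PORT A =====
def solution (code : String) : String :=
  let cs := code.toList
  let st := (PySem.List.pyRange 0 (PySem.Str.len code) 1).foldl
    (fun (st : List Char × Int) idx =>
      -- code[idx]: idx ranges over range(len(code)), always in range, so pyGetD is exact here
      let c := PySem.List.pyGetD cs idx ' '
      if st.2 = 0 then
        if c ≠ '1' then
          if PySem.Int.mod idx 2 = 0 then (st.1 ++ [c], st.2) else st
        else if c = '1' then (st.1, 1) else st
      else if st.2 = 1 then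
        if c ≠ '1' then
          if PySem.Int.mod idx 2 = 1 then (st.1 ++ [c], st.2) else st
        else if c = '1' then (st.1, 0) else st
      else st)
    ([], 0)
  if st.1.length > 0 then String.ofList st.1 else "EMPTY"

-- ===== PORT B =====
-- seg[(k - pos) % 2 :: 2] is ported by hand (PySem.List.slice has no step argument):
-- the start offset (k - pos) % 2 is 0 or 1, so `.drop` + keep-every-other is exact.
def pvStride2 : List Char → List Char
  | [] => []
  | [c] => [c]
  | c :: _ :: cs => c :: pvStride2 cs

def solution_alt (code : String) : String :=
  let parts := PySem.Chars.splitOn code.toList ['1']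
  let st := (PySem.List.enumerate parts 0).foldl
    (fun (st : List Char × Int) kp =>
      (st.1 ++ pvStride2 (kp.2.drop (PySem.Int.mod (kp.1 - st.2) 2).toNat),
       st.2 + kp.2.length + 1))
    (([] : List Char), (0 : Int))
  if st.1 ≠ [] then String.ofList st.1 else "EMPTY"

-- ===== PRECONDITION & SPEC =====
def Spec_solution (code : String) (out : String) : Prop := out = solution_alt code
instance (code : String) (out : String) : Decidable (Spec_solution code out) := by unfold Spec_solution; infer_instance

-- ===== CLAIM (what is proved, stated in full; the proofs are below) =====
def Claim_equal_solution : Prop := ∀ (code : String), Dom_solution code → Spec_solution code (solution code)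

-- ===== LEMMAS AND PROOFS =====

-- common specification: index i, count o of '1's seen so far
def pvF : List Char → Int → Int → List Char
  | [], _, _ => []
  | c :: cs, i, o =>
    if c = '1' then pvF cs (i + 1) (o + 1)
    else if o % 2 = i % 2 then c :: pvF cs (i + 1) o
    else pvF cs (i + 1) o

-- A's fold computes pvF (proved on the enumerate form, then transported to the range form)
theorem pvA_fold (cs : List Char) (s : Int) (ret : List Char) (o : Int) :
    ((PySem.List.enumerate cs s).foldl
      (fun (st : List Char × Int) p =>
        if st.2 = 0 then
          if p.2 ≠ '1' then
            if p.1 % 2 = 0 then (st.1 ++ [p.2], st.2) else st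
          else if p.2 = '1' then (st.1, 1) else st
        else if st.2 = 1 then
          if p.2 ≠ '1' then
            if p.1 % 2 = 1 then (st.1 ++ [p.2], st.2) else st
          else if p.2 = '1' then (st.1, 0) else st
        else st)
      (ret, o % 2)).1 = ret ++ pvF cs s o := by
  induction cs generalizing s ret o with
  | nil => simp [pvF, PySem.List.enumerate_nil]
  | cons c cs ih =>
    have ho2 : o % 2 = 0 ∨ o % 2 = 1 := by omega
    simp only [PySem.List.enumerate_cons, List.foldl_cons]
    by_cases h1 : c = '1'
    · subst h1
      rcases ho2 with h | h
      · have h' : (o + 1) % 2 = 1 := by omega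
        have ih' := ih (s + 1) ret (o + 1)
        rw [h'] at ih'
        simpa [pvF, h] using ih'
      · have h' : (o + 1) % 2 = 0 := by omega
        have ih' := ih (s + 1) ret (o + 1)
        rw [h'] at ih'
        simpa [pvF, h] using ih'
    · rcases ho2 with h | h <;> by_cases h2 : o % 2 = s % 2
      · have hs : s % 2 = 0 := by omega
        have ih' := ih (s + 1) (ret ++ [c]) o
        rw [h] at ih'
        simpa [pvF, h1, h, h2, hs] using ih'
      · have hs : ¬ s % 2 = 0 := by omega
        have hs' : ¬ ((0 : Int) = s % 2) := by omega
        have ih' := ih (s + 1) ret o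
        rw [h] at ih'
        simpa [pvF, h1, h, h2, hs, hs'] using ih'
      · have hs : s % 2 = 1 := by omega
        have ih' := ih (s + 1) (ret ++ [c]) o
        rw [h] at ih'
        simpa [pvF, h1, h, h2, hs] using ih'
      · have hs : ¬ s % 2 = 1 := by omega
        have hs' : ¬ ((1 : Int) = s % 2) := by omega
        have ih' := ih (s + 1) ret o
        rw [h] at ih'
        simpa [pvF, h1, h, h2, hs, hs'] using ih'

-- structural model of code.split('1')
def pvSplit1 : List Char → List (List Char)
  | [] => [[]]
  | c :: cs =>
    if c = '1' then [] :: pvSplit1 cs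
    else match pvSplit1 cs with
      | [] => [[c]]
      | p :: ps => (c :: p) :: ps

theorem pvSplit1_ne_nil (cs : List Char) : pvSplit1 cs ≠ [] := by
  cases cs with
  | nil => simp [pvSplit1]
  | cons c cs =>
    simp only [pvSplit1]
    split_ifs
    · simp
    · cases h : pvSplit1 cs <;> simp

theorem pvGo_spec (l : List Char) (fuel : Nat) (cur : List Char) (acc : List (List Char))
    (hf : l.length ≤ fuel) :
    PySem.Chars.splitOn.go ['1'] fuel l cur acc
      = acc.reverse ++
        (match pvSplit1 l with
         | [] => [cur.reverse]
         | p :: ps => (cur.reverse ++ p) :: ps) := by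
  induction l generalizing fuel cur acc with
  | nil =>
    cases fuel <;> simp [PySem.Chars.splitOn.go, pvSplit1]
  | cons c rest ih =>
    cases fuel with
    | zero => simp at hf
    | succ f =>
      have hf' : rest.length ≤ f := by simpa using hf
      obtain ⟨p, ps, hps⟩ : ∃ p ps, pvSplit1 rest = p :: ps := by
        cases h : pvSplit1 rest with
        | nil => exact absurd h (pvSplit1_ne_nil rest)
        | cons p ps => exact ⟨p, ps, rfl⟩
      by_cases hc : c = '1'
      · subst hc
        rw [PySem.Chars.splitOn.go]
        simp only [List.isPrefixOf, BEq.rfl, Bool.true_and, if_true,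
          List.drop_succ_cons, List.drop_zero, List.length_singleton]
        rw [ih f [] (cur.reverse :: acc) hf']
        simp [pvSplit1, hps]
      · rw [PySem.Chars.splitOn.go]
        have hc' : ¬ '1' = c := fun hx => hc hx.symm
        have hpre : ['1'].isPrefixOf (c :: rest) = false := by
          simp [List.isPrefixOf, hc']
        rw [hpre]
        simp only [Bool.false_eq_true, if_false]
        rw [ih f (c :: cur) acc hf']
        simp [pvSplit1, hc, hps]
      
theorem pvSplitOn_eq (cs : List Char) : PySem.Chars.splitOn cs ['1'] = pvSplit1 cs := by
  rw [PySem.Chars.splitOn, pvGo_spec cs (cs.length + 1) [] [] (by omega)]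
  obtain ⟨p, ps, hps⟩ : ∃ p ps, pvSplit1 cs = p :: ps := by
    cases h : pvSplit1 cs with
    | nil => exact absurd h (pvSplit1_ne_nil cs)
    | cons p ps => exact ⟨p, ps, rfl⟩
  simp [hps]

theorem pvSplit1_no_one (cs : List Char) : ∀ p ∈ pvSplit1 cs, '1' ∉ p := by
  induction cs with
  | nil => simp [pvSplit1]
  | cons c cs ih =>
    intro p hp
    by_cases hc : c = '1'
    · simp only [pvSplit1, hc, if_true, List.mem_cons] at hp
      rcases hp with rfl | hp
      · simp
      · exact ih p hp
    · obtain ⟨q, qs, hqs⟩ : ∃ q qs, pvSplit1 cs = q :: qs := by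
        cases h : pvSplit1 cs with
        | nil => exact absurd h (pvSplit1_ne_nil cs)
        | cons q qs => exact ⟨q, qs, rfl⟩
      simp only [pvSplit1, hc, if_false, hqs, List.mem_cons] at hp
      rcases hp with rfl | hp
      · have hq : '1' ∉ q := ih q (by rw [hqs]; exact List.mem_cons_self)
        intro hmem
        rcases List.mem_cons.mp hmem with hx | hx
        · exact hc hx.symm
        · exact hq hx
      · exact ih p (by rw [hqs]; exact List.mem_cons_of_mem _ hp)

-- rejoin with the separator
def pvJoin1 : List (List Char) → List Char
  | [] => []
  | [p] => p
  | p :: ps => p ++ '1' :: pvJoin1 ps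

theorem pvJoin1_split1 (cs : List Char) : pvJoin1 (pvSplit1 cs) = cs := by
  induction cs with
  | nil => simp [pvSplit1, pvJoin1]
  | cons c cs ih =>
    obtain ⟨q, qs, hqs⟩ : ∃ q qs, pvSplit1 cs = q :: qs := by
      cases h : pvSplit1 cs with
      | nil => exact absurd h (pvSplit1_ne_nil cs)
      | cons q qs => exact ⟨q, qs, rfl⟩
    rw [hqs] at ih
    by_cases hc : c = '1'
    · simp only [pvSplit1, hc, if_true, hqs, pvJoin1]
      simpa [hc] using congrArg ('1' :: ·) ih
    · simp only [pvSplit1, hc, if_false, hqs]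
      cases qs with
      | nil => simpa [pvJoin1] using congrArg (c :: ·) ih
      | cons r rs =>
        simp only [pvJoin1] at ih ⊢
        simpa using congrArg (c :: ·) ih

-- a '1'-free segment of pvF is the stride-2 slice starting at offset (o - i) % 2
theorem pvStride2_cons (c : Char) (cs : List Char) :
    pvStride2 (c :: cs) = c :: pvStride2 (cs.drop 1) := by
  cases cs <;> simp [pvStride2]

theorem pvSeg (seg : List Char) (t : List Char) (i o : Int) (h : '1' ∉ seg) :
    pvF (seg ++ t) i o
      = pvStride2 (seg.drop (PySem.Int.mod (o - i) 2).toNat) ++ pvF t (i + seg.length) o := by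
  have hm : ∀ a : Int, PySem.Int.mod a 2 = a % 2 := fun a =>
    PySem.Int.mod_eq_emod_of_pos (by omega)
  induction seg using pvStride2.induct generalizing i with
  | case1 => simp [pvStride2]
  | case2 c =>
    have hc : ¬ c = '1' := by intro hx; exact h (by simp [hx])
    rcases (by omega : (o - i) % 2 = 0 ∨ (o - i) % 2 = 1) with he | he
    · have hp : o % 2 = i % 2 := by omega
      rw [hm, he]
      simp [pvF, hc, hp, pvStride2]
    · have hp : ¬ o % 2 = i % 2 := by omega
      rw [hm, he]
      simp [pvF, hc, hp, pvStride2]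
  | case3 c d rest ih =>
    have hc : ¬ c = '1' := by intro hx; exact h (by simp [hx])
    have hd : ¬ d = '1' := by intro hx; exact h (by simp [hx])
    have hrest : '1' ∉ rest := fun hx => h (by simp [hx])
    have hmod : PySem.Int.mod (o - (i + 2)) 2 = PySem.Int.mod (o - i) 2 := by
      rw [hm, hm]; omega
    have ih2 : pvF (rest ++ t) (i + 1 + 1) o
        = pvStride2 (rest.drop (PySem.Int.mod (o - i) 2).toNat)
            ++ pvF t (i + ((c :: d :: rest).length : Nat)) o := by
      have hih := ih (i + 2) hrest
      rw [hmod] at hih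
      have h21 : i + 1 + 1 = i + 2 := by ring
      have hidx2 : i + (((c :: d :: rest).length : Nat) : Int) = i + 2 + rest.length := by
        simp only [List.length_cons]
        push_cast
        omega
      rw [h21, hih, hidx2]
    rcases (by omega : (o - i) % 2 = 0 ∨ (o - i) % 2 = 1) with he | he
    · have hp : o % 2 = i % 2 := by omega
      have hq : ¬ o % 2 = (i + 1) % 2 := by omega
      have hq2 : ¬ i % 2 = (i + 1) % 2 := by omega
      rw [List.cons_append, List.cons_append, hm, he]
      simp only [pvF, hc, hd, if_false, hp, if_true, ih2]
      simp [pvStride2, hq2, he]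
    · have hp : ¬ o % 2 = i % 2 := by omega
      have hq : o % 2 = (i + 1) % 2 := by omega
      have hq2 : ¬ (i + 1) % 2 = i % 2 := by omega
      rw [List.cons_append, List.cons_append, hm, he]
      simp only [pvF, hc, hd, if_false, hq, if_true, ih2]
      simp [pvStride2_cons, hq2, he]

theorem pvB_fold (parts : List (List Char)) (k pos : Int) (acc : List Char)
    (h : ∀ p ∈ parts, '1' ∉ p) :
    ((PySem.List.enumerate parts k).foldl
      (fun (st : List Char × Int) kp =>
        (st.1 ++ pvStride2 (kp.2.drop (PySem.Int.mod (kp.1 - st.2) 2).toNat),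
         st.2 + kp.2.length + 1))
      (acc, pos)).1 = acc ++ pvF (pvJoin1 parts) pos k := by
  induction parts generalizing k pos acc with
  | nil => simp [pvJoin1, pvF, PySem.List.enumerate_nil]
  | cons seg rest ih =>
    have hseg : '1' ∉ seg := h seg List.mem_cons_self
    have hrest : ∀ p ∈ rest, '1' ∉ p := fun p hp => h p (List.mem_cons_of_mem _ hp)
    simp only [PySem.List.enumerate_cons, List.foldl_cons]
    cases rest with
    | nil =>
      simp only [PySem.List.enumerate_nil, List.foldl_nil, pvJoin1]
      have := pvSeg seg [] pos k hseg
      simp only [List.append_nil, pvF] at this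
      simp [this]
    | cons r rs =>
      rw [ih (k + 1) (pos + seg.length + 1) _ hrest]
      have hj : pvJoin1 (seg :: r :: rs) = seg ++ '1' :: pvJoin1 (r :: rs) := rfl
      rw [hj, pvSeg seg ('1' :: pvJoin1 (r :: rs)) pos k hseg]
      simp only [pvF, if_true]
      simp [add_assoc]

theorem pvA_closed (code : String) :
    solution code
      = if pvF code.toList 0 0 = [] then "EMPTY" else String.ofList (pvF code.toList 0 0) := by
  have hA := pvA_fold code.toList 0 [] 0
  rw [PySem.List.enumerate_eq_map_pyRange (d := ' '), List.foldl_map] at hA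
  norm_num at hA
  simp only [solution]
  simp [hA]
  cases pvF code.toList 0 0 <;> simp

theorem pvB_closed (code : String) :
    solution_alt code
      = if pvF code.toList 0 0 = [] then "EMPTY" else String.ofList (pvF code.toList 0 0) := by
  have hB := pvB_fold (pvSplit1 code.toList) 0 0 [] (pvSplit1_no_one code.toList)
  rw [pvJoin1_split1] at hB
  simp only [solution_alt, pvSplitOn_eq]
  simp at hB
  simp [hB]

-- ===== VERDICT (by name: the statement is the Claim_ definition above) =====
theorem solution_spec : Claim_equal_solution := by
  unfold Claim_equal_solution
  intro code _
  unfold Spec_solution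
  rw [pvA_closed, pvB_closed]
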